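-- pv_equiv track=rewrite | github.com/ruihanglix/diffgentor | diffgentor/backends/t2i/google_genai_backend.py | _normalize_base_url_and_version
-- ===== SOURCE A (Python) =====
-- from typing import List, Optional, Tuple, Union
--
-- def _normalize_base_url_and_version(
--     base_url: Optional[str],
--     api_version: Optional[str],
-- ) -> Tuple[Optional[str], Optional[str]]:
--     """Normalize base_url/api_version for google-genai HttpOptions.
--
--     Some proxies expose versioned base URLs like 'http://host/v1beta'.
--     The google-genai SDK typically appends api_version itself.
--     """
--     if not base_url:
--         return None, api_version
--
--     b = base_url.strip().rstrip("/")
--     for suffix in ("/v1beta", "/v1alpha", "/v1"):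
--         if b.endswith(suffix):
--             inferred = suffix[1:]
--             b = b[: -len(suffix)]
--             if api_version is None:
--                 api_version = inferred
--             break
--     return b, api_version
-- ===== SOURCE B (Python) =====
-- from typing import Optional, Tuple
--
-- _VERSIONS = ("v1beta", "v1alpha", "v1")
--
--
-- def _normalize_base_url_and_version(
--     base_url: Optional[str],
--     api_version: Optional[str],
-- ) -> Tuple[Optional[str], Optional[str]]:
--     if not base_url:
--         return None, api_version
--
--     b = base_url.strip().rstrip("/")
--     parts = b.split("/")
--     if len(parts) >= 2 and parts[-1] in _VERSIONS:
--         if api_version is None: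
--             api_version = parts[-1]
--         parts = parts[:-1]
--     return "/".join(parts), api_version
-- ===== Notes on version B (the rewrite author's own statement) =====
-- stated objective: alternative
-- what changed: B splits the stripped URL into its list of path segments, inspects/pops the last segment against the known version names, and rejoins with '/', instead of A's ordered endswith-loop that slices a matched suffix off the string.
import Mathlib
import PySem

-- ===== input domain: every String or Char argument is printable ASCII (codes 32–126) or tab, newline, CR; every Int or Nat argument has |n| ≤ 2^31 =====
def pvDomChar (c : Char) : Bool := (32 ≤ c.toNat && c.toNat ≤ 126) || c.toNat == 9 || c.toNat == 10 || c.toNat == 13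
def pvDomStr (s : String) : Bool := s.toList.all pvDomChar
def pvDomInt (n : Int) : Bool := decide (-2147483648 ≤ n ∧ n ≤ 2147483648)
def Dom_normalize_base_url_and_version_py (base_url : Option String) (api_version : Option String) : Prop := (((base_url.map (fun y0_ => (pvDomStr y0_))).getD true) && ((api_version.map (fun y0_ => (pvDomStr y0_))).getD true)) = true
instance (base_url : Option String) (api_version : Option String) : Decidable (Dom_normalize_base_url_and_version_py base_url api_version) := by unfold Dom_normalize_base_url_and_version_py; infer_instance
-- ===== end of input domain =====

-- B splits the stripped URL into its path-segment list, pops a known version name off the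
-- end and rejoins with '/', instead of A's ordered endswith-loop slicing off a matched
-- suffix (objective: alternative).

-- ===== PORT A =====
-- b.rstrip("/") — exact for the single strip character '/'
def pvRstripSlash (cs : List Char) : List Char :=
  (cs.reverse.dropWhile (fun c => c == '/')).reverse

-- the 'for suffix in (…): if b.endswith(suffix): …; break' loop, suffixes in order
def pvA_loop (suffixes : List (List Char)) (b : List Char) (api : Option String) :
    List Char × Option String :=
  match suffixes with
  | [] => (b, api)
  | suf :: rest =>
    if PySem.Chars.endswith b suf then
      let inferred := PySem.List.slice suf (some 1) none
      let b' := PySem.List.slice b none (some (-(suf.length : Int)))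
      (b', match api with | none => some (String.ofList inferred) | some v => some v)
    else pvA_loop rest b api

def normalize_base_url_and_version_py (base_url : Option String) (api_version : Option String) :
    Option String × Option String :=
  match base_url with
  | none => (none, api_version)
  | some s =>
    if s.toList.isEmpty then (none, api_version)  -- 'if not base_url'
    else
      let b := pvRstripSlash (PySem.Chars.strip s.toList)
      let r := pvA_loop ["/v1beta".toList, "/v1alpha".toList, "/v1".toList] b api_version
      (some (String.ofList r.1), r.2)

-- ===== PORT B =====
def normalize_base_url_and_version_py_alt (base_url : Option String) (api_version : Option String) :
    Option String × Option String :=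
  match base_url with
  | none => (none, api_version)
  | some s =>
    if s.toList.isEmpty then (none, api_version)
    else
      let b := pvRstripSlash (PySem.Chars.strip s.toList)
      let parts := PySem.Chars.splitOn b ['/']          -- b.split("/")
      match PySem.List.pyGet? parts (-1) with           -- parts[-1] (split never yields [])
      | none => (some (String.ofList (PySem.Chars.join ['/'] parts)), api_version)
      | some t =>
        if 2 ≤ parts.length ∧ (t = "v1beta".toList ∨ t = "v1alpha".toList ∨ t = "v1".toList) then
          (some (String.ofList (PySem.Chars.join ['/'] (PySem.List.slice parts none (some (-1))))),
           match api_version with | none => some (String.ofList t) | some v => some v)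
        else (some (String.ofList (PySem.Chars.join ['/'] parts)), api_version)

-- ===== PRECONDITION & SPEC =====
def Spec_normalize_base_url_and_version_py (base_url : Option String) (api_version : Option String) (out : Option String × Option String) : Prop := out = normalize_base_url_and_version_py_alt base_url api_version
instance (base_url : Option String) (api_version : Option String) (out : Option String × Option String) : Decidable (Spec_normalize_base_url_and_version_py base_url api_version out) := by unfold Spec_normalize_base_url_and_version_py; infer_instance

-- ===== CLAIM (what is proved, stated in full; the proofs are below) =====
def Claim_equal_normalize_base_url_and_version_py : Prop := ∀ (base_url : Option String) (api_version : Option String), Dom_normalize_base_url_and_version_py base_url api_version → Spec_normalize_base_url_and_version_py base_url api_version (normalize_base_url_and_version_py base_url api_version)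

-- ===== LEMMAS AND PROOFS =====

-- proof-side split at the LAST '/': some (head, tail), none if no '/'
def pvRpart (cs : List Char) : Option (List Char × List Char) :=
  match cs with
  | [] => none
  | c :: rest =>
    match pvRpart rest with
    | some (h, t) => some (c :: h, t)
    | none => if c == '/' then some ([], rest) else none

theorem pvRpart_eq_none_iff (cs : List Char) : pvRpart cs = none ↔ '/' ∉ cs := by
  induction cs with
  | nil => simp [pvRpart]
  | cons c rest ih =>
    simp only [pvRpart]
    cases hr : pvRpart rest with
    | some p => simp_all
    | none =>
      simp only [hr] at ih
      by_cases hc : c = '/'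
      · simp_all
      · simp_all
        exact fun hx => hc hx.symm

theorem pvRpart_spec (cs h t : List Char) (hcs : pvRpart cs = some (h, t)) :
    cs = h ++ '/' :: t ∧ '/' ∉ t := by
  induction cs generalizing h with
  | nil => simp [pvRpart] at hcs
  | cons c rest ih =>
    simp only [pvRpart] at hcs
    cases hr : pvRpart rest with
    | some p =>
      obtain ⟨h', t'⟩ := p
      rw [hr] at hcs
      simp only [Option.some.injEq, Prod.mk.injEq] at hcs
      obtain ⟨hh, ht⟩ := hcs
      obtain ⟨he, hn⟩ := ih h' (by rw [hr, ht])
      subst hh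
      exact ⟨by simp [he], hn⟩
    | none =>
      rw [hr] at hcs
      by_cases hc : c = '/'
      · simp [hc] at hcs
        obtain ⟨hh, ht⟩ := hcs
        subst ht
        exact ⟨by simp [hc, hh], (pvRpart_eq_none_iff rest).mp hr⟩
      · simp [hc] at hcs

-- endswith against '/'::p when the last segment is t: matches exactly when p = t
theorem endswith_seg_iff (h t p : List Char) (hnt : '/' ∉ t) (hnp : '/' ∉ p) :
    PySem.Chars.endswith (h ++ '/' :: t) ('/' :: p) = true ↔ p = t := by
  rw [PySem.Chars.endswith_iff]
  constructor
  · intro hs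
    have ht : ('/' :: t) <:+ (h ++ '/' :: t) := List.suffix_append h _
    rcases List.suffix_or_suffix_of_suffix hs ht with h1 | h1
    · rcases (List.suffix_cons_iff).mp h1 with h2 | h2
      · exact (List.cons.injEq _ _ _ _ ▸ h2).2 ▸ rfl
      · exact absurd (h2.mem (by simp)) hnt
    · rcases (List.suffix_cons_iff).mp h1 with h2 | h2
      · exact ((List.cons.injEq _ _ _ _ ▸ h2).2).symm ▸ rfl
      · exact absurd (h2.mem (by simp)) hnp
  · intro hp; subst hp; exact List.suffix_append h _

theorem endswith_no_slash (b p : List Char) (hnb : '/' ∉ b) :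
    PySem.Chars.endswith b ('/' :: p) = false := by
  rw [← Bool.not_eq_true, PySem.Chars.endswith_iff]
  intro hs
  exact hnb (hs.mem (by simp))

theorem slice_cut (h t : List Char) (k : Nat) (hk : k = ('/' :: t).length) :
    PySem.List.slice (h ++ '/' :: t) none (some (-(k : Int))) = h := by
  rw [PySem.List.slice_to_neg_natCast _ k (by rw [hk]; simp)]
  have : (h ++ '/' :: t).length - k = h.length := by simp [hk]
  rw [this, List.take_left]

theorem loop_eq (b : List Char) (api : Option String) :
    pvA_loop ["/v1beta".toList, "/v1alpha".toList, "/v1".toList] b api =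
      (match pvRpart b with
       | some (h, t) =>
         if t = "v1beta".toList ∨ t = "v1alpha".toList ∨ t = "v1".toList then
           (h, match api with | none => some (String.ofList t) | some v => some v)
         else (b, api)
       | none => (b, api)) := by
  cases hr : pvRpart b with
  | none =>
    have hnb := (pvRpart_eq_none_iff b).mp hr
    simp only [pvA_loop]
    rw [show ("/v1beta".toList) = '/' :: "v1beta".toList from rfl,
        show ("/v1alpha".toList) = '/' :: "v1alpha".toList from rfl,
        show ("/v1".toList) = '/' :: "v1".toList from rfl,
        endswith_no_slash b _ hnb, endswith_no_slash b _ hnb, endswith_no_slash b _ hnb]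
    simp
  | some p =>
    obtain ⟨h, t⟩ := p
    obtain ⟨he, hnt⟩ := pvRpart_spec b h t hr
    subst he
    simp only [pvA_loop]
    rw [show ("/v1beta".toList) = '/' :: "v1beta".toList from rfl,
        show ("/v1alpha".toList) = '/' :: "v1alpha".toList from rfl,
        show ("/v1".toList) = '/' :: "v1".toList from rfl]
    by_cases h1 : "v1beta".toList = t
    · rw [(endswith_seg_iff h t _ hnt (by decide)).mpr h1]
      simp only [if_true]
      rw [slice_cut h t _ (by rw [← h1])]
      subst h1
      simp [PySem.List.slice_from_one]
    · rw [Bool.eq_false_iff.mpr (fun hc => h1 ((endswith_seg_iff h t _ hnt (by decide)).mp hc))]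
      simp only [Bool.false_eq_true, if_false]
      by_cases h2 : "v1alpha".toList = t
      · rw [(endswith_seg_iff h t _ hnt (by decide)).mpr h2]
        simp only [if_true]
        rw [slice_cut h t _ (by rw [← h2])]
        subst h2
        simp [PySem.List.slice_from_one]
      · rw [Bool.eq_false_iff.mpr (fun hc => h2 ((endswith_seg_iff h t _ hnt (by decide)).mp hc))]
        simp only [Bool.false_eq_true, if_false]
        by_cases h3 : "v1".toList = t
        · rw [(endswith_seg_iff h t _ hnt (by decide)).mpr h3]
          simp only [if_true]
          rw [slice_cut h t _ (by rw [← h3])]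
          subst h3
          simp [PySem.List.slice_from_one]
        · rw [Bool.eq_false_iff.mpr (fun hc => h3 ((endswith_seg_iff h t _ hnt (by decide)).mp hc))]
          have h1' : ¬ t = ['v','1','b','e','t','a'] := fun hx => h1 (by rw [hx]; rfl)
          have h2' : ¬ t = ['v','1','a','l','p','h','a'] := fun hx => h2 (by rw [hx]; rfl)
          have h3' : ¬ t = ['v','1'] := fun hx => h3 (by rw [hx]; rfl)
          simp [h1', h2', h3']

-- structural model of b.split('/')
def pvSplit : List Char → List (List Char)
  | [] => [[]]
  | c :: rest =>
    if c = '/' then [] :: pvSplit rest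
    else (c :: (pvSplit rest).headI) :: (pvSplit rest).tail

theorem pvSplit_ne_nil (l : List Char) : pvSplit l ≠ [] := by
  cases l with
  | nil => simp [pvSplit]
  | cons c rest => by_cases hc : c = '/' <;> simp [pvSplit, hc]

theorem splitOn_go_spec (fuel : Nat) :
    ∀ (l cur : List Char) (acc : List (List Char)), l.length < fuel →
      PySem.Chars.splitOn.go ['/'] fuel l cur acc =
        acc.reverse ++ ((cur.reverse ++ (pvSplit l).headI) :: (pvSplit l).tail) := by
  induction fuel with
  | zero => intro l cur acc h; omega
  | succ fuel ih =>
    intro l cur acc h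
    cases l with
    | nil => simp [PySem.Chars.splitOn.go, pvSplit]
    | cons c rest =>
      rw [PySem.Chars.splitOn.go]
      by_cases hc : c = '/'
      · have : List.isPrefixOf ['/'] (c :: rest) = true := by simp [List.isPrefixOf, hc]
        rw [if_pos this]
        simp only [List.length_singleton, List.drop_one, List.tail_cons]
        rw [ih rest [] _ (by simpa using Nat.lt_of_succ_lt_succ h)]
        have hne := pvSplit_ne_nil rest
        simp [pvSplit, hc, List.headI_cons]
        cases hps : pvSplit rest with
        | nil => exact absurd hps hne
        | cons a as => simp
      · have : List.isPrefixOf ['/'] (c :: rest) = false := by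
          simp [List.isPrefixOf]; exact fun hx => hc hx.symm
        rw [if_neg (by simp [this])]
        rw [ih rest (c :: cur) acc (by simpa using Nat.lt_of_succ_lt_succ h)]
        simp [pvSplit, hc]

theorem splitOn_eq_pvSplit (l : List Char) :
    PySem.Chars.splitOn l ['/'] = pvSplit l := by
  rw [PySem.Chars.splitOn]
  rw [splitOn_go_spec (l.length + 1) l [] [] (by omega)]
  have hne := pvSplit_ne_nil l
  cases hps : pvSplit l with
  | nil => exact absurd hps hne
  | cons a as => simp

theorem intercalate_cons2 (x y : List Char) (xs : List (List Char)) :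
    List.intercalate ['/'] (x :: y :: xs) = x ++ '/' :: List.intercalate ['/'] (y :: xs) := by
  simp [List.intercalate]

theorem intercalate_pvSplit (l : List Char) :
    List.intercalate ['/'] (pvSplit l) = l := by
  induction l with
  | nil => simp [pvSplit, List.intercalate]
  | cons c rest ih =>
    have hne := pvSplit_ne_nil rest
    cases hps : pvSplit rest with
    | nil => exact absurd hps hne
    | cons a as =>
      rw [hps] at ih
      by_cases hc : c = '/'
      · simp only [pvSplit, hc, if_true, hps, intercalate_cons2, ih]
        simp
      · simp only [pvSplit, hc, if_false, hps, List.headI_cons, List.tail_cons]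
        cases as with
        | nil => simp_all [List.intercalate]
        | cons b bs =>
          rw [intercalate_cons2] at ih ⊢
          simp [ih]

theorem pvSplit_no_slash (l : List Char) (h : '/' ∉ l) : pvSplit l = [l] := by
  induction l with
  | nil => rfl
  | cons c rest ih =>
    have hc : c ≠ '/' := fun hx => h (by simp [hx])
    have := ih (fun hx => h (by simp [hx]))
    simp [pvSplit, hc, this]

theorem pvSplit_append (h t : List Char) (hnt : '/' ∉ t) :
    pvSplit (h ++ '/' :: t) = pvSplit h ++ [t] := by
  induction h with
  | nil => simp [pvSplit, pvSplit_no_slash t hnt]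
  | cons c h' ih =>
    by_cases hc : c = '/'
    · simp [pvSplit, hc, ih]
    · have hne := pvSplit_ne_nil h'
      cases hps : pvSplit h' with
      | nil => exact absurd hps hne
      | cons a as =>
        rw [hps] at ih
        simp only [List.cons_append, pvSplit, hc, if_false, ih, hps]
        simp

theorem pyGet_last (ys : List (List Char)) (t : List Char) :
    PySem.List.pyGet? (ys ++ [t]) (-1) = some t := by
  simp [PySem.List.pyGet?, PySem.List.pyIdx?]

theorem slice_dropLast (ys : List (List Char)) (t : List Char) :
    PySem.List.slice (ys ++ [t]) none (some (-1)) = ys := by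
  rw [show (-1 : Int) = -((1 : Nat) : Int) from rfl]
  rw [PySem.List.slice_to_neg_natCast _ 1 (by simp)]
  simp

-- ===== VERDICT (by name: the statement is the Claim_ definition above) =====
theorem normalize_base_url_and_version_py_spec : Claim_equal_normalize_base_url_and_version_py := by
  intro base_url api_version _
  unfold Spec_normalize_base_url_and_version_py
  cases base_url with
  | none => rfl
  | some s =>
    simp only [normalize_base_url_and_version_py, normalize_base_url_and_version_py_alt]
    by_cases he : s.toList.isEmpty
    · rw [if_pos he, if_pos he]
    · rw [if_neg he, if_neg he]
      rw [loop_eq, splitOn_eq_pvSplit]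
      cases hr : pvRpart (pvRstripSlash (PySem.Chars.strip s.toList)) with
      | none =>
        have hnb := (pvRpart_eq_none_iff _).mp hr
        dsimp only
        rw [pvSplit_no_slash _ hnb]
        simp [PySem.List.pyGet?, PySem.List.pyIdx?, PySem.Chars.join, List.intercalate]
      | some p =>
        obtain ⟨h, t⟩ := p
        obtain ⟨he2, hnt⟩ := pvRpart_spec _ h t hr
        dsimp only
        rw [he2, pvSplit_append h t hnt, pyGet_last]
        dsimp only
        have hlen : 2 ≤ (pvSplit h ++ [t]).length := by
          have hne := pvSplit_ne_nil h
          cases hps : pvSplit h with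
          | nil => exact absurd hps hne
          | cons a as => simp
        by_cases ht : t = "v1beta".toList ∨ t = "v1alpha".toList ∨ t = "v1".toList
        · rw [if_pos ht, if_pos ⟨hlen, ht⟩, slice_dropLast]
          simp [PySem.Chars.join, intercalate_pvSplit]
        · rw [if_neg ht, if_neg (fun hx => ht hx.2)]
          have hj : List.intercalate ['/'] (pvSplit h ++ [t]) = h ++ '/' :: t := by
            rw [← pvSplit_append h t hnt, intercalate_pvSplit]
          simp [PySem.Chars.join, hj]
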